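-- pv_equiv track=rewrite | github.com/PyroGenesis/Codiq | LeetCode/2429-Minimize-XOR.py | minimizeXorSinglePass
-- ===== SOURCE A (Python) =====
-- def minimizeXorSinglePass(num1: int, num2: int) -> int:
--     """One pass but less readable than the two pass method"""
--     # get the number of bits in num2
--     # I destroy num2 here but idc
--     bits_to_set = 0
--     while num2:
--         bits_to_set += 1
--         num2 &= num2 - 1
--
--     # the final XORed num
--     x = 0
--
--     # in first pass we try to invert as many set bits as possible in num1 starting from msb
--     # at the same time, we can decide to invert a non-set bit if we find that we won't have
--     #   enough bits to fulfill the bit requirement later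
--     for pos in range(31, -1, -1):
--         # quit early if we've satisfied the bit requirement
--         if bits_to_set == 0:
--             break
--         mask = 1 << pos
--         bits_left = pos + 1
--         # if we have enough positions ahead to fulfill bit requirement AND
--         #   the current bit is 0, skip it
--         if bits_left > bits_to_set and mask & num1 == 0:
--             continue
--         x |= mask
--         bits_to_set -= 1
--
--     return x
-- ===== SOURCE B (Python) =====
-- def minimizeXorSinglePass(num1: int, num2: int) -> int:
--     """Two-pass rewrite: take num1's set bits from the top, then fill lowest free bits."""
--     budget = bin(num2).count('1')
--     x = 0
--     for pos in range(31, -1, -1):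
--         if budget and (num1 >> pos) & 1:
--             x |= 1 << pos
--             budget -= 1
--     for pos in range(32):
--         if budget == 0:
--             break
--         if (x >> pos) & 1 == 0:
--             x |= 1 << pos
--             budget -= 1
--     return x
-- ===== Notes on version B (the rewrite author's own statement) =====
-- stated objective: simpler
-- what changed: A's single descending pass, which interleaves taking num1's set bits with a forced-fill condition (bits_left > bits_to_set), is replaced by the standard two-pass greedy: one pass taking num1's set bits from the most significant end while budget remains, then a second pass filling the lowest still-unset bits; the popcount of num2 is taken with bin().count('1') instead of the n&(n-1) loop.
import Mathlib
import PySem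

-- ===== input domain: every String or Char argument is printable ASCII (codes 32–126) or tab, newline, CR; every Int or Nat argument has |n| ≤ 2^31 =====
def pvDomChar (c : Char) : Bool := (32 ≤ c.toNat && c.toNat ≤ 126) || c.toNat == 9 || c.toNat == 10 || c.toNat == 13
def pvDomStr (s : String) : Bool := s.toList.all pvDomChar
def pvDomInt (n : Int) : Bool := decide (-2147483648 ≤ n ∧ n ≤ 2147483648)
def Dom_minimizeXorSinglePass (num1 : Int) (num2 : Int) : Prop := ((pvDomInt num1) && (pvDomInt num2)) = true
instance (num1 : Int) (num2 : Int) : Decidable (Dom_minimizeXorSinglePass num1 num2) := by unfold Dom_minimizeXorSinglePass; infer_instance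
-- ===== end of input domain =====

-- B replaces A's single descending pass (with its forced-fill condition) by the standard
-- two-pass greedy: take num1's set bits from the top, then fill the lowest free bits.
-- Objective: simpler/more readable; same cost.

-- ===== PORT A =====

-- termination fact for A's `while num2: num2 &= num2 - 1` popcount loop
theorem pv_land_pred_lt (n : Int) (h : 0 < n) : (Int.land n (n - 1)).toNat < n.toNat := by
  match n, h with
  | Int.ofNat (m+1), _ =>
    have h1 : (Int.ofNat (m+1) - 1) = Int.ofNat m := by
      simp [Int.ofNat_eq_natCast]
    rw [h1]
    show ((m+1) &&& m : Nat) < m + 1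
    have := @Nat.and_le_right (m+1) m
    omega

-- Python: `while num2: bits_to_set += 1; num2 &= num2 - 1`.  The guard `0 < n` only makes the
-- recursion total: for n < 0 the Python loop never terminates (those inputs are outside Pre_).
def pvPopA (n : Int) : Int :=
  if h : 0 < n then pvPopA (Int.land n (n - 1)) + 1 else 0
termination_by n.toNat
decreasing_by exact pv_land_pred_lt n h

-- Python: `for pos in range(31, -1, -1)` with A's break/continue structure;
-- fuel n means the current position is n - 1; `(1:Int) <<< n` is `mask = 1 << pos`,
-- `(n:Int) + 1` is `bits_left = pos + 1`.
def pvALoop (num1 : Int) : Nat → Int → Int → Int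
  | 0, _, x => x
  | n+1, bits, x =>
    if bits = 0 then x                                          -- `if bits_to_set == 0: break`
    else if (n : Int) + 1 > bits ∧ Int.land ((1 : Int) <<< n) num1 = 0 then
      pvALoop num1 n bits x                                     -- `continue`
    else
      pvALoop num1 n (bits - 1) (Int.lor x ((1 : Int) <<< n))   -- `x |= mask; bits_to_set -= 1`

def minimizeXorSinglePass (num1 : Int) (num2 : Int) : Int :=
  pvALoop num1 32 (pvPopA num2) 0

-- ===== PORT B =====

-- Python: `bin(num2).count('1')` = number of 1 digits in the binary expansion of |num2|
def pvBinOnes (n : Nat) : Nat :=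
  if n = 0 then 0 else pvBinOnes (n / 2) + n % 2
termination_by n
decreasing_by exact Nat.div_lt_self (Nat.pos_of_ne_zero (by assumption)) (by omega)

-- first pass: `for pos in range(31, -1, -1): if budget and (num1 >> pos) & 1: ...`
def pvBLoop1 (num1 : Int) : Nat → Int → Int → Int × Int
  | 0, b, x => (x, b)
  | n+1, b, x =>
    if b ≠ 0 ∧ Int.land (num1 >>> n) 1 ≠ 0 then
      pvBLoop1 num1 n (b - 1) (Int.lor x ((1 : Int) <<< n))
    else
      pvBLoop1 num1 n b x

-- second pass: `for pos in range(32): if budget == 0: break; if (x >> pos) & 1 == 0: ...`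
def pvBLoop2 : Nat → Nat → Int → Int → Int
  | 0, _, _, x => x
  | f+1, pos, b, x =>
    if b = 0 then x
    else if Int.land (x >>> pos) 1 = 0 then
      pvBLoop2 f (pos + 1) (b - 1) (Int.lor x ((1 : Int) <<< pos))
    else
      pvBLoop2 f (pos + 1) b x

def minimizeXorSinglePass_alt (num1 : Int) (num2 : Int) : Int :=
  let budget : Int := (pvBinOnes num2.natAbs : Int)
  let p := pvBLoop1 num1 32 budget 0
  pvBLoop2 32 0 p.2 p.1

-- ===== PRECONDITION & SPEC =====
-- Pre_ excludes num2 < 0, on which A's popcount loop `num2 &= num2 - 1` never terminates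
-- (Python diverges, returning nothing).
def Pre_minimizeXorSinglePass (num1 : Int) (num2 : Int) : Prop := 0 ≤ num2
instance (num1 : Int) (num2 : Int) : Decidable (Pre_minimizeXorSinglePass num1 num2) := by
  unfold Pre_minimizeXorSinglePass; infer_instance

def pvWitness_minimizeXorSinglePass : Int × Int := (25, 72)

def Spec_minimizeXorSinglePass (num1 : Int) (num2 : Int) (out : Int) : Prop := out = minimizeXorSinglePass_alt num1 num2
instance (num1 : Int) (num2 : Int) (out : Int) : Decidable (Spec_minimizeXorSinglePass num1 num2 out) := by unfold Spec_minimizeXorSinglePass; infer_instance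

-- ===== CLAIM (what is proved, stated in full; the proofs are below) =====
def Claim_equal_minimizeXorSinglePass : Prop := ∀ (num1 : Int) (num2 : Int), Dom_minimizeXorSinglePass num1 num2 → Pre_minimizeXorSinglePass num1 num2 → Spec_minimizeXorSinglePass num1 num2 (minimizeXorSinglePass num1 num2)

-- ===== LEMMAS AND PROOFS =====

-- ---- popcount: A's n&(n-1) loop = B's binary-digit count ----

theorem pvBinOnes_double (c : Nat) : pvBinOnes (2 * c) = pvBinOnes c := by
  rcases Nat.eq_zero_or_pos c with h | h
  · subst h; rfl
  · rw [pvBinOnes, if_neg (by omega)]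
    have h1 : 2 * c / 2 = c := by omega
    have h2 : 2 * c % 2 = 0 := by omega
    rw [h1, h2]
    omega

theorem pv_odd_and_pred (a : Nat) : (2 * a + 1) &&& (2 * a) = 2 * a := by
  apply Nat.eq_of_testBit_eq
  intro i
  rw [Nat.testBit_land]
  cases i with
  | zero =>
    have h : (2 * a).testBit 0 = false := by
      rw [Nat.testBit_zero]
      simp only [decide_eq_false_iff_not]
      omega
    simp [h]
  | succ i =>
    simp only [Nat.testBit_succ]
    have h1 : (2 * a + 1) / 2 = a := by omega
    have h2 : (2 * a) / 2 = a := by omega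
    rw [h1, h2, Bool.and_self]

theorem pv_even_and_pred (a : Nat) (h : 0 < a) :
    (2 * a) &&& (2 * a - 1) = 2 * (a &&& (a - 1)) := by
  apply Nat.eq_of_testBit_eq
  intro i
  rw [Nat.testBit_land]
  cases i with
  | zero =>
    have h1 : (2 * a).testBit 0 = false := by
      rw [Nat.testBit_zero]
      simp only [decide_eq_false_iff_not]
      omega
    have h2 : (2 * (a &&& (a - 1))).testBit 0 = false := by
      rw [Nat.testBit_zero]
      simp only [decide_eq_false_iff_not]
      omega
    simp [h1, h2]
  | succ i =>
    simp only [Nat.testBit_succ]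
    have h1 : (2 * a) / 2 = a := by omega
    have h2 : (2 * a - 1) / 2 = a - 1 := by omega
    have h3 : 2 * (a &&& (a - 1)) / 2 = a &&& (a - 1) := by omega
    rw [h1, h2, h3, Nat.testBit_land]

theorem pvBinOnes_trick (m : Nat) (h : 0 < m) :
    pvBinOnes (m &&& (m - 1)) + 1 = pvBinOnes m := by
  induction m using Nat.strong_induction_on with
  | _ m ih =>
    rcases Nat.even_or_odd m with ⟨a, ha⟩ | ⟨a, ha⟩
    · -- m = 2a, a > 0
      have ha' : m = 2 * a := by omega
      have hap : 0 < a := by omega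
      subst ha'
      rw [pv_even_and_pred a hap, pvBinOnes_double, pvBinOnes_double]
      exact ih a (by omega) hap
    · -- m = 2a + 1
      have ha' : m = 2 * a + 1 := by omega
      subst ha'
      have h1 : 2 * a + 1 - 1 = 2 * a := by omega
      rw [h1, pv_odd_and_pred, pvBinOnes_double]
      conv_rhs => rw [pvBinOnes]
      rw [if_neg (by omega)]
      have h3 : (2 * a + 1) / 2 = a := by omega
      have h4 : (2 * a + 1) % 2 = 1 := by omega
      rw [h3, h4]

theorem pvPopA_eq_binOnes (m : Nat) : pvPopA (m : Int) = (pvBinOnes m : Int) := by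
  induction m using Nat.strong_induction_on with
  | _ m ih =>
    rcases Nat.eq_zero_or_pos m with h | h
    · subst h; rw [pvPopA]; simp [pvBinOnes]
    · rw [pvPopA]
      have h0 : (0 : Int) < (m : Int) := by exact_mod_cast h
      rw [dif_pos h0]
      have hland : Int.land (m : Int) ((m : Int) - 1) = ((m &&& (m - 1) : Nat) : Int) := by
        obtain ⟨k, hk⟩ : ∃ k, m = k + 1 := ⟨m - 1, by omega⟩
        subst hk
        have h1 : ((k + 1 : Nat) : Int) - 1 = (k : Int) := by push_cast; ring
        have h2 : (k + 1 - 1 : Nat) = k := by omega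
        rw [h1, h2]
        rfl
      rw [hland, ih (m &&& (m - 1)) (by have := @Nat.and_le_right m (m - 1); omega)]
      have := pvBinOnes_trick m h
      push_cast
      omega

theorem pvBinOnes_le (d : Nat) : ∀ m, m < 2 ^ d → pvBinOnes m ≤ d := by
  induction d with
  | zero =>
    intro m hm
    have : m = 0 := by
      have : (2 : Nat) ^ 0 = 1 := by norm_num
      omega
    subst this
    simp [pvBinOnes]
  | succ d ih =>
    intro m hm
    rcases Nat.eq_zero_or_pos m with h | h
    · subst h; simp [pvBinOnes]
    · rw [pvBinOnes, if_neg (by omega)]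
      have hp : (2 : Nat) ^ (d + 1) = 2 ^ d * 2 := Nat.pow_succ 2 d
      have : m / 2 < 2 ^ d := by omega
      have := ih (m / 2) this
      omega

-- ---- bit-test bridges: the Int-level tests the ports make, as Bool testBit ----

theorem pv_ofNat_eq_zero (a : Nat) : (Int.ofNat a = 0) ↔ a = 0 := by
  rw [Int.ofNat_eq_natCast]
  exact Int.natCast_eq_zero

theorem pv_ldiff_pow (n : Nat) (m : Nat) :
    Nat.ldiff (2 ^ n) m = 2 ^ n * (!(m.testBit n)).toNat := by
  cases hb : m.testBit n with
  | true =>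
    simp only [Bool.not_true, Bool.toNat_false, Nat.mul_zero]
    apply Nat.eq_of_testBit_eq
    intro i
    rw [Nat.testBit_ldiff, Nat.testBit_two_pow, Nat.zero_testBit]
    by_cases h : n = i
    · subst h; simp [hb]
    · simp [h]
  | false =>
    simp only [Bool.not_false, Bool.toNat_true, Nat.mul_one]
    apply Nat.eq_of_testBit_eq
    intro i
    rw [Nat.testBit_ldiff, Nat.testBit_two_pow]
    by_cases h : n = i
    · subst h; simp [hb, Nat.testBit_two_pow]
    · simp [h, Nat.testBit_two_pow]

theorem pv_maskTest (num1 : Int) (n : Nat) :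
    (Int.land ((1 : Int) <<< n) num1 = 0) ↔ num1.testBit n = false := by
  cases num1 with
  | ofNat m =>
    show (Int.ofNat ((1 <<< n) &&& m) = 0) ↔ m.testBit n = false
    rw [Nat.one_shiftLeft, Nat.two_pow_and, pv_ofNat_eq_zero]
    cases hb : m.testBit n <;> simp [hb]
  | negSucc m =>
    show (Int.ofNat (Nat.ldiff (1 <<< n) m) = 0) ↔ (!m.testBit n) = false
    rw [Nat.one_shiftLeft, pv_ldiff_pow, pv_ofNat_eq_zero]
    cases hb : m.testBit n <;> simp [hb]

theorem pv_shiftTest (y : Int) (n : Nat) :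
    (Int.land (y >>> n) 1 = 0) ↔ y.testBit n = false := by
  cases y with
  | ofNat m =>
    show (Int.ofNat ((m >>> n) &&& 1) = 0) ↔ m.testBit n = false
    rw [Nat.and_one_is_mod, Nat.shiftRight_eq_div_pow, pv_ofNat_eq_zero,
      Nat.testBit_eq_decide_div_mod_eq]
    constructor
    · intro h
      simp only [decide_eq_false_iff_not]
      omega
    · intro h
      simp only [decide_eq_false_iff_not] at h
      omega
  | negSucc m =>
    show (Int.ofNat (Nat.ldiff 1 (m >>> n)) = 0) ↔ (!m.testBit n) = false
    have h1 : Nat.ldiff 1 (m >>> n) = 2 ^ 0 * (!((m >>> n).testBit 0)).toNat := by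
      have := pv_ldiff_pow 0 (m >>> n)
      simpa using this
    have h2 : (m >>> n).testBit 0 = m.testBit n := by
      rw [Nat.testBit_eq_decide_div_mod_eq, Nat.testBit_eq_decide_div_mod_eq,
        Nat.shiftRight_eq_div_pow]
      simp
    rw [h1, h2, pv_ofNat_eq_zero]
    cases hb : m.testBit n <;> simp

theorem pv_lorNat (x : Nat) (n : Nat) :
    Int.lor (x : Int) ((1 : Int) <<< n) = ((x ||| 2 ^ n : Nat) : Int) := by
  show Int.ofNat (x ||| (1 <<< n)) = _
  rw [Nat.one_shiftLeft]
  rfl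

-- ---- ghost data about num1's bits ----

-- mask / count of num1's set bits among positions < n
def pvM (num1 : Int) : Nat → Nat
  | 0 => 0
  | n+1 => pvM num1 n ||| (if num1.testBit n then 2 ^ n else 0)

def pvS (num1 : Int) : Nat → Nat
  | 0 => 0
  | n+1 => pvS num1 n + (if num1.testBit n then 1 else 0)

theorem pvM_testBit (num1 : Int) (n : Nat) (i : Nat) :
    (pvM num1 n).testBit i = (decide (i < n) && num1.testBit i) := by
  induction n with
  | zero => simp [pvM]
  | succ n ih =>
    rw [pvM, Nat.testBit_lor, ih]
    by_cases hi : i = n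
    · subst hi
      cases h : num1.testBit i
      · simp [h, Nat.testBit_two_pow]
      · simp [h, Nat.testBit_two_pow]
    · have hd : decide (i < n) = decide (i < n + 1) := by
        by_cases h2 : i < n
        · have h3 : i < n + 1 := by omega
          simp [h2, h3]
        · have h3 : ¬ i < n + 1 := by omega
          simp [h2, h3]
      have hni : (decide (n = i)) = false := by
        simp only [decide_eq_false_iff_not]
        omega
      cases h : num1.testBit n
      · rw [if_neg (by simp), Nat.zero_testBit, Bool.or_false, hd]
      · rw [if_pos rfl, Nat.testBit_two_pow, hni, Bool.or_false, hd]

theorem pvS_le (num1 : Int) (n : Nat) : pvS num1 n ≤ n := by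
  induction n with
  | zero => simp [pvS]
  | succ n ih => rw [pvS]; split_ifs <;> omega

-- zero count of x in [p, e)
def pvZc (x : Nat) (p e : Nat) : Nat :=
  ((Finset.Ico p e).filter (fun i => x.testBit i = false)).card

-- number of unset bits of num1 below n
theorem pv_card_unset (num1 : Int) (n : Nat) :
    ((Finset.Ico 0 n).filter (fun i => num1.testBit i = false)).card = n - pvS num1 n := by
  induction n with
  | zero => simp [pvS]
  | succ n ih =>
    rw [show Finset.Ico 0 (n+1) = insert n (Finset.Ico 0 n) by
      rw [← Finset.range_eq_Ico, Finset.range_add_one]]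
    rw [Finset.filter_insert]
    have hSn := pvS_le num1 n
    cases ht : num1.testBit n with
    | true =>
      rw [if_neg (by simp [ht]), ih, pvS, if_pos ht]
      omega
    | false =>
      rw [if_pos (by simp [ht])]
      rw [Finset.card_insert_of_notMem (by
        intro hmem
        simp [Finset.mem_filter, Finset.mem_Ico] at hmem)]
      rw [ih, pvS, if_neg (by simp [ht])]
      omega

-- ---- loop lemmas ----

-- B1 with zero budget does nothing
theorem pvBLoop1_zero (num1 : Int) (n : Nat) (x : Int) :
    pvBLoop1 num1 n 0 x = (x, 0) := by
  induction n with
  | zero => rfl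
  | succ n ih => rw [pvBLoop1]; simp [ih]

-- B2 with zero budget does nothing
theorem pvBLoop2_zero (f p : Nat) (x : Int) : pvBLoop2 f p 0 x = x := by
  cases f with
  | zero => rfl
  | succ f => rw [pvBLoop2]; simp

-- A's forced fill: once bits_to_set equals the number of positions left, everything is set
theorem pvALoop_forced (num1 : Int) (n : Nat) (x : Nat) :
    pvALoop num1 n (n : Int) (x : Int) = ((x ||| (2 ^ n - 1) : Nat) : Int) := by
  induction n generalizing x with
  | zero => simp [pvALoop]
  | succ n ih =>
    rw [pvALoop]
    have h0 : ((n + 1 : Nat) : Int) ≠ 0 := by positivity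
    rw [if_neg h0]
    have hc : ¬ ((n : Int) + 1 > ((n + 1 : Nat) : Int) ∧ Int.land ((1:Int) <<< n) num1 = 0) := by
      rintro ⟨h, -⟩
      push_cast at h
      omega
    rw [if_neg hc]
    have hb : ((n + 1 : Nat) : Int) - 1 = (n : Int) := by push_cast; ring
    rw [pv_lorNat, hb, ih]
    congr 1
    apply Nat.eq_of_testBit_eq
    intro i
    simp only [Nat.testBit_lor, Nat.testBit_two_pow, Nat.testBit_two_pow_sub_one]
    by_cases h : i < n
    · have h2 : i < n + 1 := by omega
      simp [h, h2]
    · by_cases h2 : n = i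
      · subst h2
        have h3 : n < n + 1 := by omega
        simp [h3]
      · have h3 : ¬ i < n + 1 := by omega
        simp [h, h2, h3]

-- B1 with ample budget takes every set bit below n
theorem pvBLoop1_full (num1 : Int) (n : Nat) :
    ∀ b x : Nat, pvS num1 n ≤ b →
    pvBLoop1 num1 n (b : Int) (x : Int) =
      (((x ||| pvM num1 n : Nat) : Int), ((b - pvS num1 n : Nat) : Int)) := by
  induction n with
  | zero =>
    intro b x _
    simp [pvBLoop1, pvM, pvS]
  | succ n ih =>
    intro b x hb
    rw [pvBLoop1]
    have htest := pv_shiftTest num1 n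
    cases ht : num1.testBit n with
    | true =>
      have hS : pvS num1 (n+1) = pvS num1 n + 1 := by rw [pvS, if_pos ht]
      have hb1 : b ≠ 0 := by rw [hS] at hb; omega
      have hcond : ((b : Int) ≠ 0 ∧ Int.land (num1 >>> n) 1 ≠ 0) := by
        refine ⟨by exact_mod_cast hb1, fun h => ?_⟩
        rw [htest.mp h] at ht
        exact Bool.false_ne_true ht
      rw [if_pos hcond]
      have hc : (b : Int) - 1 = ((b - 1 : Nat) : Int) := by omega
      rw [pv_lorNat, hc, ih (b-1) (x ||| 2 ^ n) (by rw [hS] at hb; omega)]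
      have hM : (x ||| 2 ^ n) ||| pvM num1 n = x ||| pvM num1 (n+1) := by
        rw [pvM, if_pos ht, ← Nat.lor_assoc, Nat.lor_assoc x, Nat.lor_comm (2^n), ← Nat.lor_assoc]
      rw [hM, hS]
      have : b - 1 - pvS num1 n = b - (pvS num1 n + 1) := by omega
      rw [this]
    | false =>
      have hS : pvS num1 (n+1) = pvS num1 n := by
        rw [pvS, if_neg (by simp [ht])]
        omega
      have hcond : ¬ ((b : Int) ≠ 0 ∧ Int.land (num1 >>> n) 1 ≠ 0) := by
        rintro ⟨-, h2⟩
        exact h2 (htest.mpr ht)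
      rw [if_neg hcond]
      rw [ih b x (by omega), hS]
      have hM : pvM num1 (n+1) = pvM num1 n := by
        rw [pvM, if_neg (by simp [ht]), Nat.or_zero]
      rw [hM]

-- B2 fills exactly the zeros of x in [p, e) when the budget equals their number
theorem pvBLoop2_fill (e : Nat) (f : Nat) :
    ∀ p b x : Nat, p ≤ e → e ≤ p + f → b = pvZc x p e →
    pvBLoop2 f p (b : Int) (x : Int) = ((x ||| ((2 ^ (e - p) - 1) <<< p) : Nat) : Int) := by
  induction f with
  | zero =>
    intro p b x hpe hef hb
    have he : e = p := by omega
    subst he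
    have hb0 : b = 0 := by simp [pvZc] at hb; omega
    subst hb0
    simp [pvBLoop2]
  | succ f ih =>
    intro p b x hpe hef hb
    rw [pvBLoop2]
    by_cases hb0 : b = 0
    · subst hb0
      rw [if_pos (by norm_num)]
      -- no zeros in [p, e): the fill mask adds nothing
      congr 1
      apply Nat.eq_of_testBit_eq
      intro i
      rw [Nat.testBit_lor, Nat.testBit_shiftLeft, Nat.testBit_two_pow_sub_one]
      by_cases hi : p ≤ i ∧ i < e
      · have hx : x.testBit i = true := by
          by_contra hfalse
          have hmem : i ∈ (Finset.Ico p e).filter (fun j => x.testBit j = false) := by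
            rw [Finset.mem_filter, Finset.mem_Ico]
            exact ⟨⟨hi.1, hi.2⟩, by simpa using hfalse⟩
          have : 0 < pvZc x p e := Finset.card_pos.mpr ⟨i, hmem⟩
          omega
        simp [hx]
      · have : ¬ (p ≤ i) ∨ ¬ (i - p < e - p) := by omega
        rcases this with h | h <;> simp [h]
    · have hbInt : (b : Int) ≠ 0 := by exact_mod_cast hb0
      rw [if_neg hbInt]
      have hpe' : p < e := by
        by_contra hcon
        have : e = p := by omega
        subst this
        simp [pvZc] at hb
        omega
      have hsplit : pvZc x p e = (if x.testBit p then 0 else 1) + pvZc x (p+1) e := by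
        unfold pvZc
        rw [← Finset.insert_Ico_add_one_left_eq_Ico hpe', Finset.filter_insert]
        cases hxp : x.testBit p with
        | true =>
          rw [if_neg (by simp)]
          simp
        | false =>
          rw [if_pos rfl]
          rw [Finset.card_insert_of_notMem (by
            intro hmem
            rw [Finset.mem_filter, Finset.mem_Ico] at hmem
            omega)]
          simp [Nat.add_comm]
      cases hx : x.testBit p with
      | true =>
        have htest : ¬ (Int.land ((x : Int) >>> p) 1 = 0) := by
          intro h
          have h2 := (pv_shiftTest (x : Int) p).mp h
          rw [show Int.testBit (x : Int) p = x.testBit p from rfl, hx] at h2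
          simp at h2
        rw [if_neg htest]
        rw [ih (p+1) b x (by omega) (by omega) (by rw [hsplit, hx] at hb; simpa using hb)]
        congr 1
        apply Nat.eq_of_testBit_eq
        intro i
        simp only [Nat.testBit_lor, Nat.testBit_shiftLeft, Nat.testBit_two_pow_sub_one]
        by_cases hip : i = p
        · subst hip; simp [hx]
        · congr 1
          by_cases h1 : p ≤ i
          · have h1' : p + 1 ≤ i := by omega
            have e1 : i - p < e - p ↔ i < e := by omega
            have e2 : i - (p+1) < e - (p+1) ↔ i < e := by omega
            simp only [ge_iff_le, h1, h1', decide_true, Bool.true_and]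
            rw [show (decide (i - (p+1) < e - (p+1))) = decide (i < e) by simp [e2],
              show (decide (i - p < e - p)) = decide (i < e) by simp [e1]]
          · have h1' : ¬ (p + 1 ≤ i) := by omega
            simp [h1, h1']
      | false =>
        have htest : Int.land ((x : Int) >>> p) 1 = 0 := by
          apply (pv_shiftTest (x : Int) p).mpr
          exact hx
        rw [if_pos htest]
        have hzc : b - 1 = pvZc (x ||| 2 ^ p) (p+1) e := by
          have heq : pvZc (x ||| 2 ^ p) (p+1) e = pvZc x (p+1) e := by
            unfold pvZc
            congr 1
            apply Finset.filter_congr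
            intro i hi
            rw [Finset.mem_Ico] at hi
            rw [Nat.testBit_lor, Nat.testBit_two_pow]
            have : ¬ (p = i) := by omega
            simp [this]
          rw [heq]
          rw [hsplit, hx] at hb
          simp at hb
          omega
        have hc : (b : Int) - 1 = ((b - 1 : Nat) : Int) := by omega
        rw [pv_lorNat, hc, ih (p+1) (b-1) (x ||| 2 ^ p) (by omega) (by omega) hzc]
        congr 1
        apply Nat.eq_of_testBit_eq
        intro i
        simp only [Nat.testBit_lor, Nat.testBit_shiftLeft, Nat.testBit_two_pow_sub_one,
          Nat.testBit_two_pow]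
        by_cases hip : i = p
        · subst hip
          have h1 : i - i < e - i := by omega
          simp [h1]
          exact Or.inr hpe'
        · by_cases h1 : p ≤ i
          · have h1' : p + 1 ≤ i := by omega
            have e1 : i - p < e - p ↔ i < e := by omega
            have e2 : i - (p+1) < e - (p+1) ↔ i < e := by omega
            have hpi : decide (p = i) = false := by simp [hip]; omega
            simp only [ge_iff_le, h1, h1', decide_true, Bool.true_and, hpi, Bool.false_or,
              Bool.or_assoc]
            rw [show (decide (i - (p+1) < e - (p+1))) = decide (i < e) by simp [e2],
              show (decide (i - p < e - p)) = decide (i < e) by simp [e1]]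
          · have h1' : ¬ (p + 1 ≤ i) := by omega
            have hpi : decide (p = i) = false := by simp [hip]; omega
            simp [h1, h1', hpi]

-- zero count of x ||| M below m, when x's low bits vanish
theorem pv_zc_of_low (num1 : Int) (m : Nat) (x : Nat)
    (hx : ∀ i, i < m → x.testBit i = false) :
    pvZc (x ||| pvM num1 m) 0 m = m - pvS num1 m := by
  unfold pvZc
  have key : ∀ i ∈ Finset.Ico 0 m,
      (((x ||| pvM num1 m).testBit i = false) ↔ (num1.testBit i = false)) := by
    intro i hi
    rw [Finset.mem_Ico] at hi
    rw [Nat.testBit_lor, hx i hi.2, pvM_testBit]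
    have : decide (i < m) = true := by simp [hi.2]
    rw [this]
    simp
  rw [Finset.filter_congr key]
  exact pv_card_unset num1 m

-- main loop equivalence
theorem pv_main (num1 : Int) (n : Nat) (hn : n ≤ 32) :
    ∀ k x : Nat, k ≤ n → (∀ i, i < n → x.testBit i = false) →
    pvALoop num1 n (k : Int) (x : Int) =
      pvBLoop2 32 0 (pvBLoop1 num1 n (k : Int) (x : Int)).2
        (pvBLoop1 num1 n (k : Int) (x : Int)).1 := by
  induction n with
  | zero =>
    intro k x hk _
    have : k = 0 := by omega
    subst this
    simp [pvALoop, pvBLoop1, pvBLoop2_zero]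
  | succ n ih =>
    intro k x hk hx
    by_cases hk0 : k = 0
    · subst hk0
      rw [pvALoop]
      rw [if_pos (by norm_num), Nat.cast_zero, pvBLoop1_zero]
      rw [show ((x : Int), (0:Int)).2 = (0:Int) from rfl,
        show ((x : Int), (0:Int)).1 = (x : Int) from rfl, pvBLoop2_zero]
    · have hkI : (k : Int) ≠ 0 := by exact_mod_cast hk0
      rw [pvALoop, pvBLoop1]
      rw [if_neg hkI]
      have hmask := pv_maskTest num1 n
      have hshift := pv_shiftTest num1 n
      have hcast : (k : Int) - 1 = ((k - 1 : Nat) : Int) := by omega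
      cases ht : num1.testBit n with
      | true =>
        have hA : ¬ ((n : Int) + 1 > (k : Int) ∧ Int.land ((1:Int) <<< n) num1 = 0) := by
          rintro ⟨-, h2⟩
          rw [hmask.mp h2] at ht
          exact Bool.false_ne_true ht
        have hB : ((k : Int) ≠ 0 ∧ Int.land (num1 >>> n) 1 ≠ 0) := by
          refine ⟨hkI, fun h => ?_⟩
          rw [hshift.mp h] at ht
          exact Bool.false_ne_true ht
        rw [if_neg hA, if_pos hB, pv_lorNat, hcast]
        apply ih (by omega) (k-1) (x ||| 2 ^ n) (by omega)
        intro i hi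
        rw [Nat.testBit_lor, hx i (by omega), Nat.testBit_two_pow]
        have : ¬ (n = i) := by omega
        simp [this]
      | false =>
        have hB : ¬ ((k : Int) ≠ 0 ∧ Int.land (num1 >>> n) 1 ≠ 0) := by
          rintro ⟨-, h2⟩
          exact h2 (hshift.mpr ht)
        rw [if_neg hB]
        by_cases hkn : k ≤ n
        · have hA : ((n : Int) + 1 > (k : Int) ∧ Int.land ((1:Int) <<< n) num1 = 0) := by
            refine ⟨?_, hmask.mpr ht⟩
            have : (k : Int) ≤ (n : Int) := by exact_mod_cast hkn
            omega
          rw [if_pos hA]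
          apply ih (by omega) k x hkn
          intro i hi
          exact hx i (by omega)
        · -- forced: k = n + 1; A sets everything below, B1 takes the set bits and B2 fills
          have hkn1 : k = n + 1 := by omega
          subst hkn1
          have hA : ¬ ((n : Int) + 1 > ((n+1 : Nat) : Int) ∧ Int.land ((1:Int) <<< n) num1 = 0) := by
            rintro ⟨h, -⟩
            push_cast at h
            omega
          rw [if_neg hA, pv_lorNat, hcast]
          have h1 : (n + 1 - 1 : Nat) = n := by omega
          rw [h1, pvALoop_forced]
          have hMn : pvM num1 (n+1) = pvM num1 n := by
            rw [pvM, if_neg (by simp [ht]), Nat.or_zero]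
          have hSn : pvS num1 (n+1) = pvS num1 n := by
            rw [pvS, if_neg (by simp [ht])]
            omega
          have hfull := pvBLoop1_full num1 n (n+1) x (by have := pvS_le num1 n; omega)
          rw [hfull]
          show _ = pvBLoop2 32 0 (((n + 1 - pvS num1 n : Nat) : Int))
            (((x ||| pvM num1 n : Nat) : Int))
          have hzc := pv_zc_of_low num1 (n+1) x hx
          rw [hMn, hSn] at hzc
          rw [pvBLoop2_fill (n+1) 32 0 (n + 1 - pvS num1 n) (x ||| pvM num1 n)
            (by omega) (by omega) (by rw [hzc])]
          congr 1
          apply Nat.eq_of_testBit_eq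
          intro i
          simp only [Nat.testBit_lor, Nat.testBit_two_pow, Nat.testBit_two_pow_sub_one,
            Nat.testBit_shiftLeft, pvM_testBit, Nat.sub_zero, Nat.le_zero]
          by_cases hi : i < n + 1
          · have h2 : decide (i < n + 1) = true := by simp [hi]
            have h3 : (decide (i ≥ 0)) = true := by simp
            simp only [h2, h3, Bool.and_true, Bool.true_and, Bool.or_true]
            simp
            by_cases h4 : n = i
            · exact Or.inl (Or.inr h4)
            · exact Or.inr (by omega)
          · have h2 : decide (i < n + 1) = false := by simp; omega
            have h4 : decide (n = i) = false := by simp; omega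
            have h5 : decide (i < n) = false := by simp; omega
            simp [h2, h4, h5]
            intro hle
            exact absurd hle (by omega)
  termination_by n => n

-- ===== VERDICT (by name: the statement is the Claim_ definition above) =====
theorem minimizeXorSinglePass_spec : Claim_equal_minimizeXorSinglePass := by
  intro num1 num2 hdom hpre
  unfold Spec_minimizeXorSinglePass minimizeXorSinglePass minimizeXorSinglePass_alt
  have hpre' : (0 : Int) ≤ num2 := hpre
  have hdom' : num2 ≤ 2147483648 := by
    unfold Dom_minimizeXorSinglePass pvDomInt at hdom
    simp only [Bool.and_eq_true, decide_eq_true_eq] at hdom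
    exact hdom.2.2
  have habs : num2.natAbs = num2.toNat := by omega
  have hcast : (num2.toNat : Int) = num2 := Int.toNat_of_nonneg hpre'
  have hpop : pvPopA num2 = ((pvBinOnes num2.natAbs : Nat) : Int) := by
    rw [habs, ← hcast]
    exact pvPopA_eq_binOnes num2.toNat
  rw [hpop]
  have hk : pvBinOnes num2.natAbs ≤ 32 := by
    apply pvBinOnes_le 32
    have h1 : num2.natAbs ≤ 2147483648 := by omega
    have h2 : (2 : Nat) ^ 32 = 4294967296 := by norm_num
    omega
  have hmain := pv_main num1 32 (by omega) (pvBinOnes num2.natAbs) 0 hk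
    (fun i _ => Nat.zero_testBit i)
  simpa using hmain
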